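-- pv_equiv track=rewrite | github.com/sigasi/SigasiProjectCreator | src/SigasiProjectCreator/ConverterHelper.py | get_design_subtrees
-- ===== SOURCE A (Python) =====
-- def get_design_subtrees(folder_list):
--     # Design subtrees are folders which contain design files, while none of their parent folders contain design files
--     folder_list.sort()
--     design_root_folders = []
--     current_folder = None
--     for my_folder in folder_list:
--         if (current_folder is None) or (not my_folder.startswith(current_folder)):
--             design_root_folders.append(my_folder)
--             current_folder = my_folder
--     return design_root_folders
-- ===== SOURCE B (Python) =====
-- def get_design_subtrees(folder_list):
--     # Design subtrees = folders with no proper string-prefix ancestor in the list.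
--     folder_list.sort()  # keep A's in-place sort side effect
--     s = set(folder_list)
--     return sorted(f for f in s if not any(f[:i] in s for i in range(len(f))))
-- ===== Notes on version B (the rewrite author's own statement) =====
-- stated objective: alternative
-- what changed: Instead of A's sorted single scan that tracks one running root folder, B builds a set of the folders and keeps exactly those folders none of whose proper string prefixes occurs in the set, returning them sorted; dedup comes from the set rather than from the scan.
import Mathlib
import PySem

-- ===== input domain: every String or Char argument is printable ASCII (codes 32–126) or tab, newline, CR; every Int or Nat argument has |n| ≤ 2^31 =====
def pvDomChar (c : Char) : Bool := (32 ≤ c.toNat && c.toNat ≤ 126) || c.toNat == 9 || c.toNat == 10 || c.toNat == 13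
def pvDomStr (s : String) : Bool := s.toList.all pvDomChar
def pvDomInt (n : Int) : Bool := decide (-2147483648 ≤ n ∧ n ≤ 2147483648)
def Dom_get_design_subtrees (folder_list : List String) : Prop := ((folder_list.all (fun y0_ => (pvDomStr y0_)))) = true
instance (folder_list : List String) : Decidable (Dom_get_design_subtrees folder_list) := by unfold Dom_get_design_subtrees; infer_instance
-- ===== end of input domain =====

-- B finds the prefix-minimal folders by probing each folder's proper prefixes against a set,
-- instead of A's sorted scan with a running root. Both Pythons sort folder_list in place
-- (same side effect); the equivalence proved here is about the return value.

-- ===== PORT A =====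
def get_design_subtrees (folder_list : List String) : List String :=
  let sorted_list := PySem.List.sorted folder_list (fun x => x) false
  (sorted_list.foldl
    (fun (st : List String × Option String) my_folder =>
      match st.2 with
      | none => (st.1 ++ [my_folder], some my_folder)
      | some current =>
        if PySem.Str.startswith my_folder current then st
        else (st.1 ++ [my_folder], some my_folder))
    ([], none)).1

-- ===== PORT B =====
def get_design_subtrees_alt (folder_list : List String) : List String :=
  let sorted_list := PySem.List.sorted folder_list (fun x => x) false
  let s : List String := PySem.Set.ofList sorted_list
  PySem.List.sorted
    (s.filter (fun f =>
      ! ((PySem.List.pyRange 0 (PySem.Str.len f) 1).any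
          (fun i => PySem.Set.contains s (PySem.Str.slice f none (some i))))))
    (fun x => x) false

-- ===== PRECONDITION & SPEC =====
def Spec_get_design_subtrees (folder_list : List String) (out : List String) : Prop := out = get_design_subtrees_alt folder_list
instance (folder_list : List String) (out : List String) : Decidable (Spec_get_design_subtrees folder_list out) := by unfold Spec_get_design_subtrees; infer_instance

-- ===== CLAIM (what is proved, stated in full; the proofs are below) =====
def Claim_equal_get_design_subtrees : Prop := ∀ (folder_list : List String), Dom_get_design_subtrees folder_list → Spec_get_design_subtrees folder_list (get_design_subtrees folder_list)

-- ===== LEMMAS AND PROOFS =====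

lemma prefix_ne_lex : ∀ (p f : List Char), p <+: f → p ≠ f → List.Lex (· < ·) p f := by
  intro p
  induction p with
  | nil => intro f _ hne; cases f with
    | nil => exact absurd rfl hne
    | cons a l => exact List.Lex.nil
  | cons a p' ih =>
    intro f hp hne
    rcases hp with ⟨r, hr⟩
    cases f with
    | nil => simp at hr
    | cons b f' =>
      have hab : a = b := by injection hr
      have h2 : p' ++ r = f' := by injection hr
      subst hab
      have hpre : p' <+: f' := ⟨r, h2⟩
      have hne' : p' ≠ f' := by intro h; exact hne (by rw [h])
      exact List.Lex.cons (ih f' hpre hne')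

lemma str_prefix_lt {p f : String} (hp : p.toList <+: f.toList) (hne : p ≠ f) : p < f := by
  rw [String.lt_iff_toList_lt]
  have hne' : p.toList ≠ f.toList := fun h => hne (String.toList_inj.mp h)
  exact (List.lt_iff_lex_lt _ _).mpr (prefix_ne_lex _ _ hp hne')

lemma lex_interval : ∀ (h y x : List Char), h <+: x → ¬ List.Lex (· < ·) y h → ¬ List.Lex (· < ·) x y → h <+: y := by
  intro h
  induction h with
  | nil => intro y x _ _ _; exact List.nil_prefix
  | cons c h' ih =>
    intro y x hpre h1 h2
    cases y with
    | nil => exact absurd List.Lex.nil h1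
    | cons d y' =>
      rcases hpre with ⟨r, hr⟩
      cases x with
      | nil => simp at hr
      | cons e x' =>
        have hce : c = e := by injection hr
        have hx' : h' ++ r = x' := by injection hr
        subst hce
        have hcd : c = d := by
          rcases lt_trichotomy c d with hlt | heq | hgt
          · exact absurd (List.Lex.rel hlt) h2
          · exact heq
          · exact absurd (List.Lex.rel hgt) h1
        subst hcd
        have h1' : ¬ List.Lex (· < ·) y' h' := fun hl => h1 (List.Lex.cons hl)
        have h2' : ¬ List.Lex (· < ·) x' y' := fun hl => h2 (List.Lex.cons hl)
        have := ih y' x' ⟨r, hx'⟩ h1' h2'; exact (List.prefix_cons_inj c).mpr this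

lemma str_interval {h y x : String} (hpre : h.toList <+: x.toList) (h1 : h ≤ y) (h2 : y ≤ x) : h.toList <+: y.toList := by
  apply lex_interval h.toList y.toList x.toList hpre
  · intro hl
    exact absurd (String.lt_iff_toList_lt.mpr ((List.lt_iff_lex_lt _ _).mpr hl)) (not_lt.mpr h1)
  · intro hl
    exact absurd (String.lt_iff_toList_lt.mpr ((List.lt_iff_lex_lt _ _).mpr hl)) (not_lt.mpr h2)

def pvLoop : Option String → List String → List String
  | _, [] => []
  | none, f :: t => f :: pvLoop (some f) t
  | some c, f :: t => if PySem.Str.startswith f c then pvLoop (some c) t else f :: pvLoop (some f) t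

lemma pvSW_iff (f c : String) : PySem.Str.startswith f c = true ↔ c.toList <+: f.toList := by
  simp [PySem.Str.startswith_eq, PySem.Chars.startswith_iff]

lemma foldl_eq_pvLoop : ∀ (ys acc : List String) (cur : Option String),
    (ys.foldl
      (fun (st : List String × Option String) my_folder =>
        match st.2 with
        | none => (st.1 ++ [my_folder], some my_folder)
        | some current =>
          if PySem.Str.startswith my_folder current then st
          else (st.1 ++ [my_folder], some my_folder))
      (acc, cur)).1 = acc ++ pvLoop cur ys := by
  intro ys
  induction ys with
  | nil => intro acc cur; simp [pvLoop]
  | cons f t ih =>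
    intro acc cur
    cases cur with
    | none => simp only [List.foldl_cons, pvLoop]; rw [ih]; simp
    | some c =>
      by_cases hsw : PySem.Str.startswith f c
      · simp only [List.foldl_cons, pvLoop, hsw, if_pos]
        rw [ih]
      · simp only [List.foldl_cons, pvLoop, hsw]
        rw [ih]
        simp

lemma pvLoop_some_strict : ∀ (ys : List String) (c : String), ys.Pairwise (· ≤ ·) → (∀ x ∈ ys, c ≤ x) →
    (pvLoop (some c) ys).Pairwise (· < ·) ∧ ∀ x ∈ pvLoop (some c) ys, c < x := by
  intro ys
  induction ys with
  | nil => intro c _ _; simp [pvLoop]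
  | cons f t ih =>
    intro c hp hle
    have hpt : t.Pairwise (· ≤ ·) := hp.of_cons
    have hft : ∀ x ∈ t, f ≤ x := fun x hx => List.rel_of_pairwise_cons hp hx
    have hcf : c ≤ f := hle f List.mem_cons_self
    by_cases hsw : PySem.Str.startswith f c
    · have h1 := ih c hpt (fun x hx => hle x (List.mem_cons_of_mem f hx))
      rw [show pvLoop (some c) (f :: t) = pvLoop (some c) t from by
        simp only [pvLoop, hsw, if_pos]]
      exact h1
    · have hcltf : c < f := by
        rcases lt_or_eq_of_le hcf with h | h
        · exact h
        · exfalso; apply hsw; rw [← h]; exact (pvSW_iff c c).mpr (List.prefix_refl _)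
      have h1 := ih f hpt hft
      constructor
      · simp only [pvLoop, hsw, if_neg, Bool.false_eq_true, not_false_iff]
        exact List.Pairwise.cons (fun x hx => h1.2 x hx) h1.1
      · intro x hx
        simp only [pvLoop, hsw, Bool.false_eq_true, if_neg, not_false_iff, List.mem_cons] at hx
        rcases hx with rfl | hx
        · exact hcltf
        · exact lt_trans hcltf (h1.2 x hx)

lemma pvLoop_some_mem : ∀ (ys : List String) (c : String), ys.Pairwise (· ≤ ·) → (∀ x ∈ ys, c ≤ x) → ∀ g,
    (g ∈ pvLoop (some c) ys ↔ g ∈ ys ∧ ¬ (c.toList <+: g.toList) ∧ ∀ p ∈ ys, p.toList <+: g.toList → p = g) := by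
  intro ys
  induction ys with
  | nil => intro c _ _ g; simp [pvLoop]
  | cons f t ih =>
    intro c hp hle g
    have hpt : t.Pairwise (· ≤ ·) := hp.of_cons
    have hft : ∀ x ∈ t, f ≤ x := fun x hx => List.rel_of_pairwise_cons hp hx
    have hcf : c ≤ f := hle f List.mem_cons_self
    by_cases hsw : PySem.Str.startswith f c
    · -- c is a prefix of f
      have hcpf : c.toList <+: f.toList := (pvSW_iff f c).mp hsw
      rw [show pvLoop (some c) (f :: t) = pvLoop (some c) t from by
        simp only [pvLoop, hsw, if_pos]]
      rw [ih c hpt (fun x hx => hle x (List.mem_cons_of_mem f hx)) g]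
      constructor
      · rintro ⟨hgt, hnc, hall⟩
        refine ⟨List.mem_cons_of_mem f hgt, hnc, ?_⟩
        intro p hp' hpre
        rcases List.mem_cons.mp hp' with rfl | hp'
        · exact absurd (hcpf.trans hpre) hnc
        · exact hall p hp' hpre
      · rintro ⟨hg, hnc, hall⟩
        have hgne : g ≠ f := by
          rintro rfl; exact hnc hcpf
        rcases List.mem_cons.mp hg with rfl | hg
        · exact absurd rfl hgne
        · exact ⟨hg, hnc, fun p hp' hpre => hall p (List.mem_cons_of_mem f hp') hpre⟩
    · -- c is not a prefix of f
      have hncf : ¬ c.toList <+: f.toList := fun h => hsw ((pvSW_iff f c).mpr h)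
      rw [show pvLoop (some c) (f :: t) = f :: pvLoop (some f) t from by
        simp only [pvLoop, if_neg hsw]]
      by_cases hgf : g = f
      · subst hgf
        constructor
        · intro _
          refine ⟨List.mem_cons_self, hncf, ?_⟩
          intro p hp' hpre
          rcases List.mem_cons.mp hp' with rfl | hp'
          · rfl
          · by_contra hne
            exact absurd (str_prefix_lt hpre hne) (not_lt.mpr (hft p hp'))
        · intro _
          exact List.mem_cons_self
      · rw [List.mem_cons, ih f hpt hft g]
        constructor
        · rintro (rfl | ⟨hgt, hnf, hall⟩)
          · exact absurd rfl hgf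
          · have hfg : f ≤ g := hft g hgt
            have hnc : ¬ c.toList <+: g.toList := by
              intro hcg
              -- c <+: g, c ≤ f ≤ g ⇒ c <+: f
              exact hncf (str_interval hcg hcf hfg)
            refine ⟨List.mem_cons_of_mem f hgt, hnc, ?_⟩
            intro p hp' hpre
            rcases List.mem_cons.mp hp' with rfl | hp'
            · exact absurd hpre hnf
            · exact hall p hp' hpre
        · rintro ⟨hg, hnc, hall⟩
          rcases List.mem_cons.mp hg with rfl | hg
          · exact absurd rfl hgf
          · right
            refine ⟨hg, ?_, fun p hp' hpre => hall p (List.mem_cons_of_mem f hp') hpre⟩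
            intro hfpre
            exact hgf (hall f List.mem_cons_self hfpre).symm

lemma pvLoop_none_strict (ys : List String) (hs : ys.Pairwise (· ≤ ·)) : (pvLoop none ys).Pairwise (· < ·) := by
  cases ys with
  | nil => simp [pvLoop]
  | cons h t =>
    have hpt : t.Pairwise (· ≤ ·) := hs.of_cons
    have hft : ∀ x ∈ t, h ≤ x := fun x hx => List.rel_of_pairwise_cons hs hx
    have h1 := pvLoop_some_strict t h hpt hft
    rw [show pvLoop none (h :: t) = h :: pvLoop (some h) t from rfl]
    exact List.Pairwise.cons (fun x hx => h1.2 x hx) h1.1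

lemma pvLoop_none_mem (ys : List String) (hs : ys.Pairwise (· ≤ ·)) (g : String) :
    g ∈ pvLoop none ys ↔ g ∈ ys ∧ ∀ p ∈ ys, p.toList <+: g.toList → p = g := by
  cases ys with
  | nil => simp [pvLoop]
  | cons h t =>
    have hpt : t.Pairwise (· ≤ ·) := hs.of_cons
    have hft : ∀ x ∈ t, h ≤ x := fun x hx => List.rel_of_pairwise_cons hs hx
    rw [show pvLoop none (h :: t) = h :: pvLoop (some h) t from rfl]
    by_cases hgh : g = h
    · subst hgh
      constructor
      · intro _
        refine ⟨List.mem_cons_self, ?_⟩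
        intro p hp' hpre
        rcases List.mem_cons.mp hp' with rfl | hp'
        · rfl
        · by_contra hne
          exact absurd (str_prefix_lt hpre hne) (not_lt.mpr (hft p hp'))
      · intro _
        exact List.mem_cons_self
    · rw [List.mem_cons, pvLoop_some_mem t h hpt hft g]
      constructor
      · rintro (rfl | ⟨hgt, hnh, hall⟩)
        · exact absurd rfl hgh
        · refine ⟨List.mem_cons_of_mem h hgt, ?_⟩
          intro p hp' hpre
          rcases List.mem_cons.mp hp' with rfl | hp'
          · exact absurd hpre hnh
          · exact hall p hp' hpre
      · rintro ⟨hg, hall⟩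
        rcases List.mem_cons.mp hg with rfl | hg
        · exact absurd rfl hgh
        · right
          refine ⟨hg, ?_, fun p hp' hpre => hall p (List.mem_cons_of_mem h hp') hpre⟩
          intro hhpre
          exact hgh (hall h List.mem_cons_self hhpre).symm

lemma alt_pred_iff (s : List String) (f : String) :
    (! ((PySem.List.pyRange 0 (PySem.Str.len f) 1).any
        (fun i => PySem.Set.contains s (PySem.Str.slice f none (some i))))) = true ↔
      ∀ p ∈ s, p.toList <+: f.toList → p = f := by
  rw [Bool.not_eq_true', List.any_eq_false]
  have hslice : ∀ (i : Int), 0 ≤ i →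
      (PySem.Str.slice f none (some i)).toList = f.toList.take i.toNat := by
    intro i hi
    rw [PySem.Str.toList_slice, PySem.Chars.slice_eq_listSlice, PySem.List.slice_to _ hi]
  constructor
  · intro hall p hps hpre
    by_contra hne
    have hlt : p.toList.length < f.toList.length := by
      rcases lt_or_eq_of_le hpre.length_le with h | h
      · exact h
      · exact absurd (String.toList_inj.mp (hpre.eq_of_length h)) hne
    have hmem : (p.toList.length : Int) ∈ PySem.List.pyRange 0 (PySem.Str.len f) 1 := by
      rw [PySem.List.mem_pyRange_one]
      constructor
      · exact_mod_cast Nat.zero_le _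
      · show (p.toList.length : Int) < PySem.Str.len f
        unfold PySem.Str.len
        exact_mod_cast hlt
    have := hall _ hmem
    apply this
    rw [PySem.Set.contains_iff]
    have : PySem.Str.slice f none (some (p.toList.length : Int)) = p := by
      rw [← String.toList_inj, hslice _ (by exact_mod_cast Nat.zero_le _)]
      simp only [Int.toNat_natCast]
      exact (List.prefix_iff_eq_take.mp hpre).symm
    rw [this]
    exact hps
  · intro hall i hi
    rw [PySem.List.mem_pyRange_one] at hi
    simp only [Bool.not_eq_true]
    rw [← Bool.not_eq_true, PySem.Set.contains_iff]
    intro hmem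
    have h0 : (0:Int) ≤ i := hi.1
    have hilt : i.toNat < f.toList.length := by
      have := hi.2
      unfold PySem.Str.len at this
      omega
    have hpre : (PySem.Str.slice f none (some i)).toList <+: f.toList := by
      rw [hslice i h0]; exact List.take_prefix _ _
    have := hall _ hmem hpre
    have hlen : (PySem.Str.slice f none (some i)).toList.length = i.toNat := by
      rw [hslice i h0, List.length_take]; omega
    rw [this] at hlen
    omega

-- ===== VERDICT (by name: the statement is the Claim_ definition above) =====
theorem get_design_subtrees_spec : Claim_equal_get_design_subtrees := by
  intro folder_list _
  simp only [Spec_get_design_subtrees, get_design_subtrees, get_design_subtrees_alt]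
  rw [foldl_eq_pvLoop _ [] none, List.nil_append]
  have hpair : (PySem.List.sorted folder_list (fun x => x) false).Pairwise (· ≤ ·) := by
    simpa using PySem.List.sorted_pairwise folder_list (fun x => x)
  apply Eq.symm
  apply PySem.List.sorted_eq_of_perm_of_pairwise_lt
  · rw [List.perm_ext_iff_of_nodup]
    · intro a
      rw [pvLoop_none_mem _ hpair a, List.mem_filter, alt_pred_iff, PySem.Set.mem_ofList]
      constructor
      · rintro ⟨ha, hall⟩
        exact ⟨ha, fun p hp hpre => hall p ((PySem.Set.mem_ofList _ p).mp hp) hpre⟩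
      · rintro ⟨ha, hall⟩
        exact ⟨ha, fun p hp hpre => hall p ((PySem.Set.mem_ofList _ p).mpr hp) hpre⟩
    · exact (pvLoop_none_strict _ hpair).imp ne_of_lt
    · exact (PySem.Set.nodup_ofList _).filter _
  · simpa using pvLoop_none_strict _ hpair
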